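-- pv_equiv track=rewrite | github.com/bicknest/coding_interview_problems | strings_and_arrays/defang_ip_address/python/defang_ip_address.py | defang_ip_address
-- ===== SOURCE A (Python) =====
-- def defang_ip_address(addr):
--     defanged_address = ""
--     for char in addr:
--         if char == ".":
--            defanged_address = defanged_address + "[.]"
--         else:
--             defanged_address = defanged_address + char
--     return defanged_address
-- ===== SOURCE B (Python) =====
-- def defang_ip_address(addr):
--     return "[.]".join(addr.split("."))
-- ===== Notes on version B (the rewrite author's own statement) =====
-- stated objective: idiomatic
-- what changed: Replaced the per-character loop that rebuilds the accumulator string on each step with a tokenize-then-join pipeline: split on dots, join the segments with the defanged separator.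
import Mathlib
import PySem

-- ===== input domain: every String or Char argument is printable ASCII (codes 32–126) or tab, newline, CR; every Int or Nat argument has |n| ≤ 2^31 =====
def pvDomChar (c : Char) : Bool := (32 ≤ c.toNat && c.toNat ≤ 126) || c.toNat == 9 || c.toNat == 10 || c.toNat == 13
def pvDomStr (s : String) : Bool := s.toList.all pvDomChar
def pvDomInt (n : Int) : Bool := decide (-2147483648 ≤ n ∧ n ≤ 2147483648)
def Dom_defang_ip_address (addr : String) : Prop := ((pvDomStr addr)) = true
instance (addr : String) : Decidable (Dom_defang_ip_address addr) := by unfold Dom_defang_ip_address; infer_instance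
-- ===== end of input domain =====

-- B replaces A's per-character accumulating loop with an idiomatic split-on-"." / join-with-"[.]" pipeline.

-- ===== PORT A =====
-- character-by-character accumulation, as in A's for-loop (strings handled as List Char, the PySem convention)
def defang_ip_address (addr : String) : String :=
  String.ofList
    (addr.toList.foldl
      (fun acc c => if c == '.' then acc ++ "[.]".toList else acc ++ [c]) [])

-- ===== PORT B =====
-- addr.split(".") then "[.]".join(...)
def defang_ip_address_alt (addr : String) : String :=
  PySem.Str.join "[.]" ((PySem.Chars.splitOn addr.toList ".".toList).map String.ofList)

-- ===== PRECONDITION & SPEC =====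
def Spec_defang_ip_address (addr : String) (out : String) : Prop := out = defang_ip_address_alt addr
instance (addr : String) (out : String) : Decidable (Spec_defang_ip_address addr out) := by unfold Spec_defang_ip_address; infer_instance

-- ===== CLAIM (what is proved, stated in full; the proofs are below) =====
def Claim_equal_defang_ip_address : Prop := ∀ (addr : String), Dom_defang_ip_address addr → Spec_defang_ip_address addr (defang_ip_address addr)

-- ===== LEMMAS AND PROOFS =====

-- a simple structural characterisation of splitting on a single dot
def pvSpl : List Char → List (List Char)
  | [] => [[]]
  | c :: cs => if c = '.' then [] :: pvSpl cs else (pvSpl cs).modifyHead (c :: ·)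

theorem pvSpl_ne_nil (cs : List Char) : pvSpl cs ≠ [] := by
  cases cs with
  | nil => simp [pvSpl]
  | cons c cs =>
    simp only [pvSpl]
    split_ifs
    · simp
    · cases h : pvSpl cs with
      | nil => exact absurd h (pvSpl_ne_nil cs)
      | cons a t => simp [List.modifyHead]

theorem go_spec : ∀ (fuel : Nat) (l cur : List Char) (acc : List (List Char)),
    l.length < fuel →
    PySem.Chars.splitOn.go ['.'] fuel l cur acc
      = acc.reverse ++ (pvSpl l).modifyHead (cur.reverse ++ ·) := by
  intro fuel
  induction fuel with
  | zero => intro l cur acc h; omega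
  | succ fuel ih =>
    intro l cur acc h
    cases l with
    | nil => simp [PySem.Chars.splitOn.go, pvSpl, List.modifyHead]
    | cons c rest =>
      by_cases hc : c = '.'
      · subst hc
        rw [show PySem.Chars.splitOn.go ['.'] (fuel+1) ('.' :: rest) cur acc
              = PySem.Chars.splitOn.go ['.'] fuel rest [] (cur.reverse :: acc) by
            simp [PySem.Chars.splitOn.go, List.isPrefixOf]]
        rw [ih rest [] (cur.reverse :: acc) (by simpa using Nat.lt_of_succ_lt_succ h)]
        simp only [pvSpl, List.reverse_cons, List.append_assoc,
          List.singleton_append]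
        cases pvSpl rest <;> simp [List.modifyHead]
      · rw [show PySem.Chars.splitOn.go ['.'] (fuel+1) (c :: rest) cur acc
              = PySem.Chars.splitOn.go ['.'] fuel rest (c :: cur) acc by
            simp [PySem.Chars.splitOn.go, List.isPrefixOf, Ne.symm hc]]
        rw [ih rest (c :: cur) acc (by simpa using Nat.lt_of_succ_lt_succ h)]
        simp only [pvSpl, if_neg hc]
        cases hs : pvSpl rest with
        | nil => exact absurd hs (pvSpl_ne_nil rest)
        | cons a t => simp [List.modifyHead]

theorem splitOn_dot (cs : List Char) : PySem.Chars.splitOn cs ['.'] = pvSpl cs := by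
  have h := go_spec (cs.length + 1) cs [] [] (Nat.lt_succ_self _)
  simp only [PySem.Chars.splitOn, h, List.reverse_nil, List.nil_append]
  cases pvSpl cs <;> simp

theorem join_spl (cs : List Char) :
    PySem.Chars.join "[.]".toList (pvSpl cs)
      = cs.flatMap (fun c => if c = '.' then "[.]".toList else [c]) := by
  induction cs with
  | nil => simp [pvSpl, PySem.Chars.join, List.intercalate]
  | cons c cs ih =>
    by_cases hc : c = '.'
    · subst hc
      simp only [pvSpl, List.flatMap_cons]
      rw [← ih]
      cases hs : pvSpl cs with
      | nil => exact absurd hs (pvSpl_ne_nil cs)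
      | cons a t => simp [PySem.Chars.join, List.intercalate]
    · simp only [pvSpl, if_neg hc, List.flatMap_cons]
      rw [← ih]
      cases hs : pvSpl cs with
      | nil => exact absurd hs (pvSpl_ne_nil cs)
      | cons a t =>
        simp only [List.modifyHead, PySem.Chars.join, List.intercalate, List.singleton_append]
        cases t <;> simp

-- ===== VERDICT (by name: the statement is the Claim_ definition above) =====
theorem defang_ip_address_spec : Claim_equal_defang_ip_address := by
  intro addr _
  unfold Spec_defang_ip_address defang_ip_address defang_ip_address_alt
  have hfun : (fun (acc : List Char) (c : Char) =>
        if c == '.' then acc ++ "[.]".toList else acc ++ [c])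
      = (fun acc c => acc ++ if c = '.' then "[.]".toList else [c]) := by
    funext acc c; simp only [beq_iff_eq]; split_ifs <;> rfl
  rw [hfun, PySem.List.foldl_append_eq_flatMap
        (fun c => if c = '.' then "[.]".toList else [c]) addr.toList []]
  have hsep : (".".toList : List Char) = ['.'] := by decide
  rw [hsep, splitOn_dot, List.nil_append, ← join_spl]
  simp [PySem.Str.join, List.map_map, Function.comp_def]
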